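-- pv_equiv track=rewrite | github.com/WrightonLabCSU/dram-viz | dram_viz/processing/process_annotations.py | make_strings_no_repeats
-- ===== SOURCE A (Python) =====
-- from collections import Counter, defaultdict
--
-- def make_strings_no_repeats(genome_taxa_dict: dict):
--     labels = dict()
--     seen = Counter()
--     for genome, taxa_string in genome_taxa_dict.items():
--         final_taxa_string = "%s_%s" % (taxa_string, str(seen[taxa_string]))
--         seen[taxa_string] += 1
--         labels[genome] = final_taxa_string
--     return labels
-- ===== SOURCE B (Python) =====
-- from collections import defaultdict
--
-- def make_strings_no_repeats(genome_taxa_dict: dict):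
--     # Two-phase group-then-number: collect the genomes carried by each taxa string,
--     # number each group with enumerate, then emit labels in the original key order.
--     groups = defaultdict(list)
--     for genome, taxa_string in genome_taxa_dict.items():
--         groups[taxa_string].append(genome)
--     label = {}
--     for taxa_string, genomes in groups.items():
--         for i, genome in enumerate(genomes):
--             label[genome] = "%s_%s" % (taxa_string, str(i))
--     return {genome: label[genome] for genome in genome_taxa_dict}
-- ===== Notes on version B (the rewrite author's own statement) =====
-- stated objective: alternative
-- what changed: B replaces A's one-pass running-Counter labelling with a two-phase group-then-number decomposition: it groups genomes by taxa string, numbers each group with enumerate, then emits the labels in the original key order; Pre_ only excludes association lists with duplicate genome keys, which do not represent any Python dict input.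
import Mathlib
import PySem

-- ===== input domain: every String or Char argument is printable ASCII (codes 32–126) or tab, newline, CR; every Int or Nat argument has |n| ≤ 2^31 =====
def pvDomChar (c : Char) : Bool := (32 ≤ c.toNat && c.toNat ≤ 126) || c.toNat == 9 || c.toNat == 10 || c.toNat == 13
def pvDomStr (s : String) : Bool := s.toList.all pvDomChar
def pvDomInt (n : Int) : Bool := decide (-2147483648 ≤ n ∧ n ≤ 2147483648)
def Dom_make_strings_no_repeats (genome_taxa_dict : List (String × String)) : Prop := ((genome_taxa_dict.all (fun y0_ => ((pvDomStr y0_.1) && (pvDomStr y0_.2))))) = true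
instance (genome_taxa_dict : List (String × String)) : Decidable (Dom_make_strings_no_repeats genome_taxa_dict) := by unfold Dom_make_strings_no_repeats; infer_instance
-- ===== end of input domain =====

-- B builds the same labels by a two-phase group-then-number decomposition (group genomes
-- by taxa string, enumerate each group, emit in original key order) instead of A's running Counter.


-- ===== PORT A =====
-- loop body: labels[genome] = "%s_%s" % (taxa, str(seen[taxa])); seen[taxa] += 1
def aStep (st : PySem.Dict String String × PySem.Dict String Int) (p : String × String) :
    PySem.Dict String String × PySem.Dict String Int :=
  let final_taxa_string := p.2 ++ "_" ++ PySem.Int.toStr (st.2.getD p.2 0)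
  (st.1.insert p.1 final_taxa_string, st.2.modify p.2 0 (· + 1))

def make_strings_no_repeats (genome_taxa_dict : List (String × String)) : List (String × String) :=
  (genome_taxa_dict.foldl aStep (PySem.Dict.empty, PySem.Dict.empty)).1.items

-- ===== PORT B =====
-- groups = defaultdict(list); for genome, taxa_string in d.items(): groups[taxa_string].append(genome)
def bGroups (genome_taxa_dict : List (String × String)) : PySem.Dict String (List String) :=
  genome_taxa_dict.foldl (fun g p => g.modify p.2 [] (fun gs => gs ++ [p.1])) PySem.Dict.empty

-- for i, genome in enumerate(genomes): label[genome] = "%s_%s" % (taxa_string, str(i))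
def bNumber (taxa_string : String) (genomes : List String) (lab : PySem.Dict String String) :
    PySem.Dict String String :=
  (PySem.List.enumerate genomes).foldl
    (fun lab ig => lab.insert ig.2 (taxa_string ++ "_" ++ PySem.Int.toStr ig.1)) lab

def bLabel (genome_taxa_dict : List (String × String)) : PySem.Dict String String :=
  (bGroups genome_taxa_dict).items.foldl (fun lab tg => bNumber tg.1 tg.2 lab) PySem.Dict.empty

-- {genome: label[genome] for genome in d}; label[genome] always succeeds (every key was grouped),
-- so the KeyError-free lookup is ported as get? followed by getD ""
def make_strings_no_repeats_alt (genome_taxa_dict : List (String × String)) : List (String × String) :=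
  (genome_taxa_dict.foldl
    (fun out p => out.insert p.1 (((bLabel genome_taxa_dict).get? p.1).getD ""))
    PySem.Dict.empty).items

-- ===== PRECONDITION & SPEC =====
-- Pre_ excludes association lists with duplicate genome keys (first components): a Python dict
-- cannot hold duplicate keys, so such lists do not represent any input the Python function accepts.
def Pre_make_strings_no_repeats (genome_taxa_dict : List (String × String)) : Prop :=
  (genome_taxa_dict.map (fun p => p.1)).Nodup
instance (genome_taxa_dict : List (String × String)) : Decidable (Pre_make_strings_no_repeats genome_taxa_dict) := by unfold Pre_make_strings_no_repeats; infer_instance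

def pvWitness_make_strings_no_repeats : (List (String × String)) := [("a", "x"), ("b", "x")]

def Spec_make_strings_no_repeats (genome_taxa_dict : List (String × String)) (out : List (String × String)) : Prop := out = make_strings_no_repeats_alt genome_taxa_dict
instance (genome_taxa_dict : List (String × String)) (out : List (String × String)) : Decidable (Spec_make_strings_no_repeats genome_taxa_dict out) := by unfold Spec_make_strings_no_repeats; infer_instance

-- ===== CLAIM (what is proved, stated in full; the proofs are below) =====
def Claim_equal_make_strings_no_repeats : Prop := ∀ (genome_taxa_dict : List (String × String)), Dom_make_strings_no_repeats genome_taxa_dict → Pre_make_strings_no_repeats genome_taxa_dict → Spec_make_strings_no_repeats genome_taxa_dict (make_strings_no_repeats genome_taxa_dict)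

-- ===== LEMMAS AND PROOFS =====

-- the label A computes for pair p after having processed prefix pre
def lbl (pre : List (String × String)) (p : String × String) : String :=
  p.2 ++ "_" ++ PySem.Int.toStr ((pre.countP (fun q => q.2 == p.2) : Nat) : Int)

-- reference recursion for A's fold: pre is the already-processed prefix
def goRef (pre : List (String × String)) :
    List (String × String) → PySem.Dict String String → PySem.Dict String String
  | [], labels => labels
  | p :: rest, labels => goRef (pre ++ [p]) rest (labels.insert p.1 (lbl pre p))

-- the items A's dict ends up with, as a plain list
def specList (pre : List (String × String)) : List (String × String) → List (String × String)
  | [] => []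
  | p :: rest => (p.1, lbl pre p) :: specList (pre ++ [p]) rest

-- the genomes carried by taxa string t, in order
def gOf (l : List (String × String)) (t : String) : List String :=
  (l.filter (fun q => q.2 == t)).map (fun q => q.1)

lemma aStep_fold_eq_goRef (rest : List (String × String)) :
    ∀ (pre : List (String × String)) (labels : PySem.Dict String String) (seen : PySem.Dict String Int),
    (∀ t : String, seen.getD t 0 = ((pre.countP (fun q => q.2 == t) : Nat) : Int)) →
    (rest.foldl aStep (labels, seen)).1 = goRef pre rest labels := by
  induction rest with
  | nil => intro pre labels seen _; simp [goRef]
  | cons p rest ih =>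
    intro pre labels seen h
    simp only [List.foldl_cons, aStep, goRef, lbl]
    rw [h p.2]
    apply ih (pre ++ [p])
    intro t
    rw [PySem.Dict.getD_modify]
    by_cases ht : t = p.2
    · subst ht
      rw [if_pos rfl, h p.2]
      simp [List.countP_append]
    · rw [if_neg ht, h t]
      have : (p.2 == t) = false := by simpa using fun e => ht e.symm
      simp [List.countP_append, this]

lemma goRef_items (rest : List (String × String)) :
    ∀ (pre : List (String × String)) (labels : PySem.Dict String String),
    (∀ q ∈ rest, labels.contains q.1 = false) → (rest.map (fun p => p.1)).Nodup →
    (goRef pre rest labels).items = labels.items ++ specList pre rest := by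
  induction rest with
  | nil => intro pre labels _ _; simp [goRef, specList]
  | cons p rest ih =>
    intro pre labels hfresh hnd
    simp only [goRef, specList]
    rw [ih (pre ++ [p]) _ ?_ ?_]
    · rw [PySem.Dict.items_insert_of_not_contains labels (lbl pre p) (hfresh p (by simp))]
      simp
    · intro q hq
      rw [PySem.Dict.contains_insert]
      have h1 : (q.1 == p.1) = false := by
        simp only [List.map_cons, List.nodup_cons] at hnd
        have hq1 : q.1 ∈ rest.map (fun p => p.1) := List.mem_map_of_mem hq
        simpa using fun e : q.1 = p.1 => hnd.1 (e ▸ hq1)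
      rw [h1, hfresh q (by simp [hq])]
      simp
    · simp only [List.map_cons, List.nodup_cons] at hnd
      exact hnd.2

-- two pairs of a fst-nodup list with equal first components are equal
lemma nodup_fst_eq {l : List (String × String)} (hnd : (l.map (fun p => p.1)).Nodup)
    {p q : String × String} (hp : p ∈ l) (hq : q ∈ l) (h1 : p.1 = q.1) : p = q := by
  induction l with
  | nil => cases hp
  | cons a l ih =>
    simp only [List.map_cons, List.nodup_cons] at hnd
    rcases List.mem_cons.mp hp with rfl | hp' <;> rcases List.mem_cons.mp hq with rfl | hq'
    · rfl
    · exact absurd (h1 ▸ List.mem_map_of_mem hq') hnd.1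
    · exact absurd (h1 ▸ List.mem_map_of_mem hp') hnd.1
    · exact ih hnd.2 hp' hq'

lemma bGroups_getD (l : List (String × String)) (t : String) :
    (bGroups l).getD t [] = gOf l t := by
  unfold bGroups gOf
  rw [show (List.foldl (fun g p => g.modify p.2 [] (fun gs => gs ++ [p.1]))
        (PySem.Dict.empty : PySem.Dict String (List String)) l)
      = List.foldl (fun d p => d.modify p.1 [] (fun x => x ++ [p.2]))
        PySem.Dict.empty (l.map Prod.swap) from
    (List.foldl_map (f := Prod.swap)
      (g := fun d (q : String × String) => d.modify q.1 [] (fun x => x ++ [q.2]))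
      (l := l) (init := PySem.Dict.empty)).symm]
  rw [PySem.Dict.getD_foldl_modify_append]
  simp [List.filter_map, Function.comp_def, Prod.swap]

lemma bGroups_keys (l : List (String × String)) :
    (bGroups l).keys = PySem.Set.update ([] : PySem.Set String) (l.map (fun p => p.2)) := by
  unfold bGroups
  rw [PySem.Dict.keys_foldl_modify_key l (fun p => p.2) [] (fun _ p => fun gs => gs ++ [p.1])]
  simp

lemma bGroups_keys_nodup (l : List (String × String)) : (bGroups l).keys.Nodup := by
  unfold bGroups
  exact PySem.Dict.nodup_keys_foldl_modify_key l (fun p => p.2) [] (fun _ p => fun gs => gs ++ [p.1]) _ (by simp)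

-- skip lemma for the inner enumerate fold
lemma bNumber_get?_not_mem (t g : String) (gs : List String) :
    ∀ (s : Int) (lab : PySem.Dict String String), g ∉ gs →
    ((PySem.List.enumerate gs s).foldl
      (fun lab ig => lab.insert ig.2 (t ++ "_" ++ PySem.Int.toStr ig.1)) lab).get? g = lab.get? g := by
  induction gs with
  | nil => intro s lab _; simp [PySem.List.enumerate_nil]
  | cons x gs ih =>
    intro s lab hg
    rw [PySem.List.enumerate_cons, List.foldl_cons, ih (s + 1) _ (fun h => hg (by simp [h]))]
    exact PySem.Dict.get?_insert_of_ne _ _ (fun e => hg (by simp [e]))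

-- hit lemma for the inner enumerate fold
lemma bNumber_get?_hit (t g : String) (u v : List String) (hgv : g ∉ v) (s : Int)
    (lab : PySem.Dict String String) :
    ((PySem.List.enumerate (u ++ g :: v) s).foldl
      (fun lab ig => lab.insert ig.2 (t ++ "_" ++ PySem.Int.toStr ig.1)) lab).get? g
    = some (t ++ "_" ++ PySem.Int.toStr (s + (u.length : Nat))) := by
  rw [PySem.List.enumerate_append, List.foldl_append, PySem.List.enumerate_cons, List.foldl_cons]
  rw [bNumber_get?_not_mem t g v _ _ hgv, PySem.Dict.get?_insert_self]

-- skip lemma for the outer fold over the groups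
lemma bLabel_outer_skip (g : String) (tgs : List (String × List String)) :
    ∀ (lab : PySem.Dict String String), (∀ tg ∈ tgs, g ∉ tg.2) →
    (tgs.foldl (fun lab tg => bNumber tg.1 tg.2 lab) lab).get? g = lab.get? g := by
  induction tgs with
  | nil => intro lab _; rfl
  | cons tg tgs ih =>
    intro lab h
    rw [List.foldl_cons, ih _ (fun x hx => h x (by simp [hx]))]
    exact bNumber_get?_not_mem tg.1 g tg.2 0 lab (h tg (by simp))

-- a genome of a fst-nodup list is only ever in its own taxa's group
lemma mem_gOf_iff {l : List (String × String)} (hnd : (l.map (fun p => p.1)).Nodup)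
    {p : String × String} (hp : p ∈ l) (t : String) : p.1 ∈ gOf l t ↔ t = p.2 := by
  unfold gOf
  constructor
  · intro h
    rcases List.mem_map.mp h with ⟨q, hq, hq1⟩
    rcases List.mem_filter.mp hq with ⟨hql, hqt⟩
    have : q = p := nodup_fst_eq hnd hql hp hq1
    subst this
    exact (eq_of_beq hqt).symm
  · intro h; subst h
    exact List.mem_map_of_mem (List.mem_filter.mpr ⟨hp, by simp⟩)

-- the key fact: bLabel looks up exactly the label A computes
lemma bLabel_get? (l pre suf : List (String × String)) (p : String × String)
    (hsplit : l = pre ++ p :: suf) (hnd : (l.map (fun p => p.1)).Nodup) :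
    (bLabel l).get? p.1 = some (lbl pre p) := by
  have hp : p ∈ l := by rw [hsplit]; simp
  -- p.2 is a key of bGroups l
  have hmem : p.2 ∈ (bGroups l).keys := by
    rw [bGroups_keys]
    exact (PySem.Set.mem_update _ _ _).mpr (Or.inr (List.mem_map_of_mem hp))
  have hknd := bGroups_keys_nodup l
  rcases List.append_of_mem hmem with ⟨k1, k2, hk⟩
  have hknd' := hk ▸ hknd
  have hτk1 : p.2 ∉ k1 := by
    intro h
    rcases List.nodup_append.mp hknd' with ⟨-, -, hdisj⟩
    exact hdisj p.2 h p.2 (by simp) rfl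
  have hτk2 : p.2 ∉ k2 := by
    rcases List.nodup_append.mp hknd' with ⟨-, h2, -⟩
    exact (List.nodup_cons.mp h2).1
  -- items of bGroups as a map over its keys
  have hitems : (bGroups l).items
      = k1.map (fun t => (t, gOf l t)) ++ (p.2, gOf l p.2) :: k2.map (fun t => (t, gOf l t)) := by
    rw [PySem.Dict.items_eq_map_keys (bGroups l) hknd [], hk]
    simp only [List.map_append, List.map_cons]
    congr 1
    · exact List.map_congr_left (fun t _ => by rw [bGroups_getD])
    · congr 1
      · rw [bGroups_getD]
      · exact List.map_congr_left (fun t _ => by rw [bGroups_getD])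
  -- split the group of p.2 around p.1
  have hgsplit : gOf l p.2
      = (pre.filter (fun q => q.2 == p.2)).map (fun q => q.1) ++ p.1 ::
        (suf.filter (fun q => q.2 == p.2)).map (fun q => q.1) := by
    unfold gOf
    rw [hsplit]
    simp [List.filter_append]
  have hndpre : p.1 ∉ pre.map (fun q => q.1) := by
    rw [hsplit] at hnd
    simp only [List.map_append, List.map_cons] at hnd
    rcases List.nodup_append.mp hnd with ⟨-, -, hdisj⟩
    exact fun h => hdisj p.1 h p.1 (by simp) rfl
  have hndsuf : p.1 ∉ suf.map (fun q => q.1) := by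
    rw [hsplit] at hnd
    simp only [List.map_append, List.map_cons] at hnd
    rcases List.nodup_append.mp hnd with ⟨-, h2, -⟩
    exact fun h => (List.nodup_cons.mp h2).1 (by simpa using h)
  have hv : p.1 ∉ (suf.filter (fun q => q.2 == p.2)).map (fun q => q.1) := by
    intro h
    rcases List.mem_map.mp h with ⟨q, hq, hq1⟩
    exact hndsuf (hq1 ▸ List.mem_map_of_mem (List.mem_filter.mp hq).1)
  -- evaluate bLabel's fold over the decomposed items
  unfold bLabel
  rw [hitems, List.foldl_append, List.foldl_cons]
  rw [bLabel_outer_skip p.1 _ _ ?_]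
  · show (bNumber p.2 (gOf l p.2) _).get? p.1 = _
    unfold bNumber
    rw [hgsplit, bNumber_get?_hit p.2 p.1 _ _ hv 0 _]
    unfold lbl
    congr 2
    rw [List.length_map, ← List.countP_eq_length_filter]
    simp
  · intro tg htg
    rcases List.mem_map.mp htg with ⟨t, ht, rfl⟩
    intro hmem'
    have : t = p.2 := (mem_gOf_iff hnd hp t).mp hmem'
    exact hτk2 (this ▸ ht)

lemma specList_eq (l : List (String × String)) (hnd : (l.map (fun p => p.1)).Nodup) :
    ∀ (rest pre : List (String × String)), l = pre ++ rest →
    specList pre rest = rest.map (fun p => (p.1, ((bLabel l).get? p.1).getD "")) := by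
  intro rest
  induction rest with
  | nil => intro pre _; simp [specList]
  | cons p rest ih =>
    intro pre hsplit
    simp only [specList, List.map_cons]
    rw [ih (pre ++ [p]) (by simp [hsplit]), bLabel_get? l pre rest p hsplit hnd]
    rfl

-- ===== VERDICT (by name: the statement is the Claim_ definition above) =====
theorem make_strings_no_repeats_spec : Claim_equal_make_strings_no_repeats := by
  intro l _ hpre
  show make_strings_no_repeats l = make_strings_no_repeats_alt l
  unfold make_strings_no_repeats make_strings_no_repeats_alt
  have hA : (l.foldl aStep (PySem.Dict.empty, PySem.Dict.empty)).1 = goRef [] l PySem.Dict.empty :=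
    aStep_fold_eq_goRef l [] PySem.Dict.empty PySem.Dict.empty (by intro t; simp [PySem.Dict.getD_empty])
  rw [hA, goRef_items l [] PySem.Dict.empty (by intro q _; simp [PySem.Dict.contains_empty]) hpre]
  rw [PySem.Dict.items_foldl_insert_fresh l (fun p => p.1)
        (fun p => ((bLabel l).get? p.1).getD "") PySem.Dict.empty
        (by intro a _; simp [PySem.Dict.contains_empty]) hpre]
  rw [specList_eq l hpre l [] rfl]
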